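-- pv_equiv track=rewrite | github.com/betterchoicedev/dietitian_web | backend/dspybackup.py | _normalize_term
-- ===== SOURCE A (Python) =====
-- from typing import List, Dict, Any, Optional
--
-- def _normalize_term(term: Optional[str]) -> str:
--     """Lowercase and strip non-alphanumeric characters for safe comparisons."""
--     if not term or not isinstance(term, str):
--         return ""
--     term = term.lower()
--     cleaned_chars = []
--     for ch in term:
--         if ch.isalnum():
--             cleaned_chars.append(ch)
--         elif ch.isspace():
--             cleaned_chars.append(" ")
--         else:
--             cleaned_chars.append(" ")
--     cleaned = "".join(cleaned_chars)
--     return " ".join(cleaned.split())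
-- ===== SOURCE B (Python) =====
-- from typing import Optional
--
-- def _normalize_term(term: Optional[str]) -> str:
--     """Lowercase and strip non-alphanumeric characters for safe comparisons."""
--     if not term or not isinstance(term, str):
--         return ""
--     words = []
--     current = []
--     for ch in term.lower():
--         if ch.isalnum():
--             current.append(ch)
--         else:
--             if current:
--                 words.append("".join(current))
--                 current = []
--     if current:
--         words.append("".join(current))
--     return " ".join(words)
-- ===== Notes on version B (the rewrite author's own statement) =====
-- stated objective: alternative
-- what changed: B tokenizes in one pass with a word buffer flushed at each non-alphanumeric char, instead of A's build-a-cleaned-string-then-split() two-phase approach.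
import Mathlib
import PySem

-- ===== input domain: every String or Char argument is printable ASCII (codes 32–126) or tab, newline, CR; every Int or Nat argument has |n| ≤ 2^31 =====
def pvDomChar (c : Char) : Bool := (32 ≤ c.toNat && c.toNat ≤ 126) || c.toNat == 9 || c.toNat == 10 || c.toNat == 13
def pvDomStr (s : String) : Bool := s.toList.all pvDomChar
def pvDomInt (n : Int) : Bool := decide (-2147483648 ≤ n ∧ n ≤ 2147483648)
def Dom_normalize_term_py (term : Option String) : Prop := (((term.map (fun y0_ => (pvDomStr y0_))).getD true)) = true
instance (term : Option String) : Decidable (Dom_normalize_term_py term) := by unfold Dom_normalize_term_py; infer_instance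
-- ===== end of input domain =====

-- B tokenizes in one pass (word buffer flushed at each non-alphanumeric char) instead of
-- A's two-phase cleaned-string-then-split(); objective: alternative decomposition, same cost.

-- ===== PORT A =====
-- A: replace each non-alnum char by ' ', then " ".join(cleaned.split())
def normalize_term_py (term : Option String) : String :=
  match term with
  | none => ""
  | some s =>
    if s = "" then ""
    else
      let lo := PySem.Chars.lower s.toList
      let cleaned := lo.foldl
        (fun acc ch =>
          if PySem.Chars.isalnum ch then acc ++ [ch]
          else if PySem.Chars.isspace ch then acc ++ [' ']
          else acc ++ [' ']) []
      String.mk (PySem.Chars.join [' '] (PySem.Chars.split₀ cleaned))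

-- ===== PORT B =====
-- one step of B's loop: state = (finished words, current word buffer)
def altStep (st : List (List Char) × List Char) (c : Char) : List (List Char) × List Char :=
  if PySem.Chars.isalnum c then (st.1, st.2 ++ [c])
  else if st.2.isEmpty then st else (st.1 ++ [st.2], [])

-- B's final flush of a non-empty buffer
def altFlush (st : List (List Char) × List Char) : List (List Char) :=
  if st.2.isEmpty then st.1 else st.1 ++ [st.2]

def normalize_term_py_alt (term : Option String) : String :=
  match term with
  | none => ""
  | some s =>
    if s = "" then ""
    else
      String.mk (PySem.Chars.join [' ']
        (altFlush ((PySem.Chars.lower s.toList).foldl altStep ([], []))))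

-- ===== PRECONDITION & SPEC =====
def Spec_normalize_term_py (term : Option String) (out : String) : Prop := out = normalize_term_py_alt term
instance (term : Option String) (out : String) : Decidable (Spec_normalize_term_py term out) := by unfold Spec_normalize_term_py; infer_instance

-- ===== CLAIM (what is proved, stated in full; the proofs are below) =====
def Claim_equal_normalize_term_py : Prop := ∀ (term : Option String), Dom_normalize_term_py term → Spec_normalize_term_py term (normalize_term_py term)

-- ===== LEMMAS AND PROOFS =====

-- A's per-char replacement
def cleanChar (ch : Char) : Char :=
  if PySem.Chars.isalnum ch then ch
  else if PySem.Chars.isspace ch then ' '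
  else ' '

lemma isspace_of_isalnum (c : Char) (h : PySem.Chars.isalnum c = true) :
    PySem.Chars.isspace c = false := by
  simp only [PySem.Chars.isalnum, PySem.Chars.isalpha, PySem.Chars.isdigit, PySem.Chars.isupper,
    PySem.Chars.islower, Char.le_def, UInt32.le_iff_toNat_le, Bool.or_eq_true, Bool.and_eq_true,
    decide_eq_true_eq, Char.toNat_val,
    show ('A':Char).toNat = 65 from rfl, show ('Z':Char).toNat = 90 from rfl,
    show ('a':Char).toNat = 97 from rfl, show ('z':Char).toNat = 122 from rfl,
    show ('0':Char).toNat = 48 from rfl, show ('9':Char).toNat = 57 from rfl] at h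
  unfold PySem.Chars.isspace
  simp only [Bool.or_eq_false_iff, Bool.and_eq_false_iff, decide_eq_false_iff_not]
  omega

lemma foldl_clean_append (cs : List Char) (acc : List Char) :
    cs.foldl
      (fun acc ch =>
        if PySem.Chars.isalnum ch then acc ++ [ch]
        else if PySem.Chars.isspace ch then acc ++ [' ']
        else acc ++ [' ']) acc = acc ++ cs.map cleanChar := by
  induction cs generalizing acc with
  | nil => simp
  | cons c rest ih =>
    simp only [List.foldl_cons, List.map_cons]
    have hstep : (if PySem.Chars.isalnum c then acc ++ [c]
        else if PySem.Chars.isspace c then acc ++ [' '] else acc ++ [' '])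
        = acc ++ [cleanChar c] := by
      unfold cleanChar; split_ifs <;> rfl
    rw [hstep, ih]
    simp

-- the core invariant: resuming Python's split() on the cleaned tail equals B's fold
lemma go_eq (cs : List Char) (cur : List Char) (words : List (List Char)) :
    PySem.Chars.split₀.go (cs.map cleanChar) cur.reverse words.reverse
      = altFlush (cs.foldl altStep (words, cur)) := by
  induction cs generalizing cur words with
  | nil =>
    simp only [List.map_nil, List.foldl_nil, PySem.Chars.split₀.go, altFlush,
      List.isEmpty_reverse]
    by_cases hc : cur.isEmpty <;> simp [hc]
  | cons c rest ih =>
    by_cases h : PySem.Chars.isalnum c = true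
    · have hs := isspace_of_isalnum c h
      have hclean : cleanChar c = c := by simp [cleanChar, h]
      simp only [List.map_cons, hclean, PySem.Chars.split₀.go, hs]
      simp only [Bool.false_eq_true, if_false]
      rw [show (c :: cur.reverse) = (cur ++ [c]).reverse by simp, ih (cur ++ [c]) words]
      simp [altStep, h]
    · have hclean : cleanChar c = ' ' := by simp [cleanChar, h]
      have hsp : PySem.Chars.isspace ' ' = true := by decide
      simp only [List.map_cons, hclean, PySem.Chars.split₀.go, hsp, if_true,
        List.isEmpty_reverse]
      by_cases hc : cur.isEmpty
      · have hcur : cur = [] := by cases cur <;> simp_all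
        simp only [hc, if_true]
        have h0 := ih [] words
        simp only [List.reverse_nil] at h0
        rw [h0]
        simp [altStep, h, hcur]
      · simp only [hc, if_false, Bool.false_eq_true]
        rw [show (cur.reverse.reverse :: words.reverse) = (words ++ [cur]).reverse by simp]
        have h0 := ih [] (words ++ [cur])
        simp only [List.reverse_nil] at h0
        rw [h0]
        simp [altStep, h, hc]

-- ===== VERDICT (by name: the statement is the Claim_ definition above) =====
theorem normalize_term_py_spec : Claim_equal_normalize_term_py := by
  intro term _
  unfold Spec_normalize_term_py normalize_term_py normalize_term_py_alt
  cases term with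
  | none => rfl
  | some s =>
    by_cases hs : s = ""
    · simp [hs]
    · simp only [hs, ite_false]
      rw [foldl_clean_append]
      simp only [List.nil_append]
      unfold PySem.Chars.split₀
      have h0 := go_eq (PySem.Chars.lower s.toList) [] []
      simp only [List.reverse_nil] at h0
      rw [h0]
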